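-- pv_equiv track=rewrite | github.com/pritykinlab/guidescanpy | src/guidescanpy/commands/generate_kmers.py | find_kmers
-- ===== SOURCE A (Python) =====
-- def find_kmers(pam, k, chrm, forward=True, end=True):
--     index = 0
--
--     while True:
--         index = chrm.find(pam, index)
--
--         if index == -1:
--             break
--
--         if end:
--             if forward:
--                 kmer = chrm[index - k : index]
--                 position = index - k
--             else:
--                 kmer = chrm[index + len(pam) : index + k + len(pam)]
--                 position = index
--         else:
--             if forward:
--                 kmer = chrm[index + len(pam) : index + k + len(pam)]
--                 position = index
--             else:
--                 kmer = chrm[index - k : index]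
--                 position = index - k
--
--         index += 1
--
--         if position < 0:
--             continue
--
--         # Return the 1-indexed position to caller
--         yield kmer.upper(), position + 1
-- ===== SOURCE B (Python) =====
-- def find_kmers(pam, k, chrm, forward=True, end=True):
--     # Rabin-Karp: rolling-hash scan; compare the window only when its hash matches pam's.
--     n, m = len(chrm), len(pam)
--     B, M = 257, (1 << 61) - 1
--     hp = 0
--     for c in pam:
--         hp = (hp * B + ord(c)) % M
--     pw = pow(B, m, M)
--     h = 0
--     for c in chrm[:m]:
--         h = (h * B + ord(c)) % M
--     for i in range(n - m + 1):
--         if h == hp and chrm[i : i + m] == pam: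
--             if forward == end:
--                 kmer, position = chrm[i - k : i], i - k
--             else:
--                 kmer, position = chrm[i + m : i + k + m], i
--             if position >= 0:
--                 yield kmer.upper(), position + 1
--         if i + m < n:
--             h = (h * B - ord(chrm[i]) * pw + ord(chrm[i + m])) % M
-- ===== Notes on version B (the rewrite author's own statement) =====
-- stated objective: alternative
-- what changed: Replaces A's repeated chrm.find(pam, index) scanning loop with a Rabin-Karp search: a rolling polynomial hash modulo 2^61-1 is maintained over a sliding window and the window is compared to pam only when the hashes match.
import Mathlib
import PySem

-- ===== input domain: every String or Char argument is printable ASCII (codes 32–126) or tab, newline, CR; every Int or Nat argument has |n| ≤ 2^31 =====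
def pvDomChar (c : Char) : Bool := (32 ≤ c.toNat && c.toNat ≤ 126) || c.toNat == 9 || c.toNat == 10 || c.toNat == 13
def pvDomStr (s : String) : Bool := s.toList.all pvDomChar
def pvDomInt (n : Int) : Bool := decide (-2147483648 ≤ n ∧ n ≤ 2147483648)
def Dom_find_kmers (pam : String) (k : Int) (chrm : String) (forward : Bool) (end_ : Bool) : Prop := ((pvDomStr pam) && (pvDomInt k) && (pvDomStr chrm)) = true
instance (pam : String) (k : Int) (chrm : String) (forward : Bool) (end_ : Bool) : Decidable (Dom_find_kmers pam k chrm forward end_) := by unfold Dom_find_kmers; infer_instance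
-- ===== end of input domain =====

-- B replaces A's while/str.find scanning loop by a Rabin-Karp rolling-hash scan:
-- hashes of pam and of each window are maintained modulo 2^61-1 and the window is
-- compared to pam only on a hash match (alternative algorithm, not claimed faster).


-- ===== PORT A =====
-- s.find(sub, start) returns -1 when start is past the end of s (CPython quirk, kept by PySem).
theorem pv_findFrom_gt (s sub : List Char) (j : Nat) (h : s.length < j) :
    PySem.Chars.findFrom s sub (j : Int) none = -1 := by
  simp only [PySem.Chars.findFrom]
  split_ifs with h1 h2 <;> first | rfl | omega

-- facts the loop's termination needs about a successful find: the hit is ≥ the start and ≤ len(s)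
theorem pv_findFrom_props (s sub : List Char) (j : Nat)
    (h : PySem.Chars.findFrom s sub (j : Int) none ≠ -1) :
    j ≤ s.length ∧ (j : Int) ≤ PySem.Chars.findFrom s sub (j : Int) none ∧
      (PySem.Chars.findFrom s sub (j : Int) none).toNat ≤ s.length := by
  have hj : j ≤ s.length := by
    by_contra hc
    exact h (pv_findFrom_gt s sub j (by omega))
  have hspec := PySem.Chars.findFrom_natCast_spec s sub j hj h
  have heq := PySem.Chars.findFrom_natCast s sub j hj
  have hle := PySem.Chars.find_le_length (s.drop j) sub
  refine ⟨hj, hspec.1, ?_⟩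
  by_cases hf : PySem.Chars.find (List.drop j s) sub = -1
  · rw [heq] at h; simp [hf] at h
  · have hnn : 0 ≤ PySem.Chars.find (List.drop j s) sub := by
      rw [PySem.Chars.find_nonneg_iff, ← PySem.Chars.find_ne_neg_one_iff]; exact hf
    rw [heq]
    simp only [hf, if_false]
    simp only [List.length_drop] at hle
    omega

-- the while-loop of A: index = chrm.find(pam, index); break on -1; branch; index += 1; maybe yield
def find_kmers_loopA (P : List Char) (k : Int) (L : List Char) (forward end_ : Bool)
    (index : Nat) : List (String × Int) :=
  let r := PySem.Chars.findFrom L P (index : Int) none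
  if h : r = -1 then []
  else
    let km_pos : List Char × Int :=
      if end_ then
        if forward then (PySem.Chars.slice L (some (r - k)) (some r), r - k)
        else (PySem.Chars.slice L (some (r + P.length)) (some (r + k + P.length)), r)
      else
        if forward then (PySem.Chars.slice L (some (r + P.length)) (some (r + k + P.length)), r)
        else (PySem.Chars.slice L (some (r - k)) (some r), r - k)
    let rest := find_kmers_loopA P k L forward end_ (r.toNat + 1)
    if km_pos.2 < 0 then rest
    else (String.ofList (PySem.Chars.upper km_pos.1), km_pos.2 + 1) :: rest
termination_by L.length + 1 - index
decreasing_by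
  have := pv_findFrom_props L P index h
  omega

def find_kmers (pam : String) (k : Int) (chrm : String) (forward : Bool) (end_ : Bool) : List (String × Int) :=
  find_kmers_loopA pam.toList k chrm.toList forward end_ 0

-- ===== PORT B =====
-- M = (1 << 61) - 1 and the hash step (h * B + ord(c)) % M of Source B
def pvM : Int := ((1 : Int) <<< 61) - 1
def pv_hash_step (a : Int) (c : Char) : Int := PySem.Int.mod (a * 257 + (c.toNat : Int)) pvM

-- the yield part of Source B's match branch: compute kmer/position, skip negative positions
def pv_emitB (P : List Char) (k : Int) (L : List Char) (forward end_ : Bool)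
    (i : Int) : List (String × Int) :=
  let km_pos : List Char × Int :=
    if forward == end_ then (PySem.Chars.slice L (some (i - k)) (some i), i - k)
    else (PySem.Chars.slice L (some (i + P.length)) (some (i + k + P.length)), i)
  if 0 ≤ km_pos.2 then [(String.ofList (PySem.Chars.upper km_pos.1), km_pos.2 + 1)] else []

-- body of Source B's main loop: emit on hash match confirmed by the window comparison, then roll the hash
def pv_stepB (P : List Char) (k : Int) (L : List Char) (forward end_ : Bool) (hp pw : Int)
    (st : Int × List (String × Int)) (i : Int) : Int × List (String × Int) :=
  let acc' := if st.1 == hp && (PySem.Chars.slice L (some i) (some (i + (P.length : Int))) == P)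
              then st.2 ++ pv_emitB P k L forward end_ i else st.2
  let h' := if i + (P.length : Int) < (L.length : Int) then
      PySem.Int.mod (st.1 * 257 - (((PySem.List.pyGet? L i).getD ' ').toNat : Int) * pw
          + (((PySem.List.pyGet? L (i + (P.length : Int))).getD ' ').toNat : Int)) pvM
    else st.1
  (h', acc')

def find_kmers_alt (pam : String) (k : Int) (chrm : String) (forward : Bool) (end_ : Bool) : List (String × Int) :=
  let P := pam.toList
  let L := chrm.toList
  let hp := P.foldl pv_hash_step 0
  let pw := PySem.Int.powMod 257 P.length pvM
  let h0 := (PySem.Chars.slice L none (some (P.length : Int))).foldl pv_hash_step 0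
  ((PySem.List.pyRange 0 ((L.length : Int) - (P.length : Int) + 1) 1).foldl
    (pv_stepB P k L forward end_ hp pw) (h0, [])).2

-- ===== PRECONDITION & SPEC =====
def Spec_find_kmers (pam : String) (k : Int) (chrm : String) (forward : Bool) (end_ : Bool) (out : List (String × Int)) : Prop := out = find_kmers_alt pam k chrm forward end_
instance (pam : String) (k : Int) (chrm : String) (forward : Bool) (end_ : Bool) (out : List (String × Int)) : Decidable (Spec_find_kmers pam k chrm forward end_ out) := by unfold Spec_find_kmers; infer_instance

-- ===== CLAIM (what is proved, stated in full; the proofs are below) =====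
def Claim_equal_find_kmers : Prop := ∀ (pam : String) (k : Int) (chrm : String) (forward : Bool) (end_ : Bool), Dom_find_kmers pam k chrm forward end_ → Spec_find_kmers pam k chrm forward end_ (find_kmers pam k chrm forward end_)

-- ===== LEMMAS AND PROOFS =====

theorem pvM_pos : (0 : Int) < pvM := by decide

-- the un-reduced polynomial hash
def pvRaw (a : Int) (l : List Char) : Int := l.foldl (fun a c => a * 257 + (c.toNat : Int)) a

-- the m-character window of L at position i
def pvWin (L : List Char) (m i : Nat) : List Char := (L.drop i).take m

-- proof-side view of one A-side scan position: emit when pam starts here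
def pv_emitScan (P : List Char) (k : Int) (L : List Char) (f e : Bool) (i : Int) : List (String × Int) :=
  if PySem.Chars.startswith (L.drop i.toNat) P then pv_emitB P k L f e i else []

-- proof-side view of one B-side scan position: emit when the window equals pam
def pvG (P : List Char) (k : Int) (L : List Char) (f e : Bool) (i : Int) : List (String × Int) :=
  if pvWin L P.length i.toNat = P then pv_emitB P k L f e i else []

theorem pvRaw_shift (l : List Char) : ∀ a : Int, pvRaw a l = a * 257 ^ l.length + pvRaw 0 l := by
  induction l with
  | nil => intro a; simp [pvRaw]
  | cons c t ih =>
    intro a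
    simp only [pvRaw, List.foldl_cons, List.length_cons] at *
    rw [ih (a * 257 + c.toNat), ih ((0 : Int) * 257 + c.toNat)]
    ring

theorem pvHash_eq_raw (l : List Char) : ∀ a : Int,
    l.foldl pv_hash_step (a % pvM) = pvRaw a l % pvM := by
  induction l with
  | nil => intro a; simp [pvRaw]
  | cons c t ih =>
    intro a
    have hstep : pv_hash_step (a % pvM) c = (a * 257 + (c.toNat : Int)) % pvM := by
      simp only [pv_hash_step, PySem.Int.mod_eq_emod_of_pos pvM_pos]
      exact (((show Int.ModEq pvM (a % pvM) a from Int.emod_emod_of_dvd a dvd_rfl).mul_right 257).add_right _)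
    simp only [List.foldl_cons, hstep, ih (a * 257 + (c.toNat : Int)), pvRaw]

-- one rolling-hash step moves the window one position to the right
theorem pv_roll (L : List Char) (m i : Nat) (hi : i + m < L.length) :
    (pvRaw 0 (pvWin L m i) % pvM * 257 - ((L[i]'(by omega)).toNat : Int) * ((257 : Int) ^ m % pvM)
        + ((L[i + m]'hi).toNat : Int)) % pvM = pvRaw 0 (pvWin L m (i + 1)) % pvM := by
  have hc : ((pvRaw 0 (pvWin L m i) % pvM * 257 - ((L[i]'(by omega)).toNat : Int) * ((257 : Int) ^ m % pvM)
        + ((L[i + m]'hi).toNat : Int)) : Int) % pvM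
      = (pvRaw 0 (pvWin L m i) * 257 - ((L[i]'(by omega)).toNat : Int) * (257 : Int) ^ m
        + ((L[i + m]'hi).toNat : Int)) % pvM := by
    exact ((((show Int.ModEq pvM (pvRaw 0 (pvWin L m i) % pvM) (pvRaw 0 (pvWin L m i)) from
        Int.emod_emod_of_dvd _ dvd_rfl).mul_right 257).sub
      ((show Int.ModEq pvM ((257 : Int) ^ m % pvM) ((257 : Int) ^ m) from
        Int.emod_emod_of_dvd _ dvd_rfl).mul_left _)).add_right _)
  rw [hc]
  congr 1
  cases m with
  | zero =>
    simp [pvWin, pvRaw]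
  | succ s =>
    have hiL : i < L.length := by omega
    have hdrop : L.drop i = L[i] :: L.drop (i + 1) := List.drop_eq_getElem_cons hiL
    have hlen1 : s < (L.drop (i + 1)).length := by simp; omega
    have hwin : pvWin L (s + 1) i = L[i] :: (L.drop (i + 1)).take s := by
      rw [pvWin, hdrop, List.take_succ_cons]
    have hwin' : pvWin L (s + 1) (i + 1) = (L.drop (i + 1)).take s ++ [L[i + (s + 1)]'hi] := by
      rw [pvWin, List.take_add_one, List.getElem?_eq_getElem hlen1]
      simp [List.getElem_drop]
      congr 1
      omega
    have hlentake : ((L.drop (i + 1)).take s).length = s := by simp; omega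
    rw [hwin, hwin']
    have h1 : pvRaw 0 (L[i] :: (L.drop (i + 1)).take s)
        = (L[i].toNat : Int) * 257 ^ s + pvRaw 0 ((L.drop (i + 1)).take s) := by
      simp only [pvRaw, List.foldl_cons]
      have := pvRaw_shift ((L.drop (i + 1)).take s) ((0 : Int) * 257 + (L[i].toNat : Int))
      simp only [pvRaw] at this
      rw [this, hlentake]
      ring
    have h2 : pvRaw 0 ((L.drop (i + 1)).take s ++ [L[i + (s + 1)]'hi])
        = pvRaw 0 ((L.drop (i + 1)).take s) * 257 + ((L[i + (s + 1)]'hi).toNat : Int) := by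
      simp [pvRaw, List.foldl_append]
    rw [h1, h2]
    ring

-- a start position with no prefix match emits nothing (A side)
theorem pv_emitScan_nil (P : List Char) (k : Int) (L : List Char) (f e : Bool) (i : Int)
    (h : ¬ P <+: L.drop i.toNat) : pv_emitScan P k L f e i = [] := by
  simp [pv_emitScan, PySem.Chars.startswith, List.isPrefixOf_iff_prefix, h]

-- A's and B's per-position emissions coincide: startswith ⇔ the window equals pam
theorem pv_emitScan_eq_pvG (P : List Char) (k : Int) (L : List Char) (f e : Bool) (i : Int) :
    pv_emitScan P k L f e i = pvG P k L f e i := by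
  simp only [pv_emitScan, pvG, PySem.Chars.startswith, List.isPrefixOf_iff_prefix, pvWin]
  by_cases h : P <+: L.drop i.toNat
  · rw [if_pos (by exact h), if_pos (by rw [← List.prefix_iff_eq_take.mp h])]
  · rw [if_neg (by exact h), if_neg (fun hw => h (by rw [← hw]; exact List.take_prefix _ _))]

-- no match anywhere at or after j ⇒ no position in [j, n] emits
theorem pv_flatMap_nil (P : List Char) (k : Int) (L : List Char) (f e : Bool) (j : Nat)
    (h : ¬ P <:+: L.drop j) :
    (PySem.List.pyRange (j : Int) ((L.length : Int) + 1) 1).flatMap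
      (pv_emitScan P k L f e) = [] := by
  apply List.flatMap_eq_nil_iff.mpr
  intro i hi
  rw [PySem.List.mem_pyRange_one] at hi
  apply pv_emitScan_nil
  intro hp
  apply h
  have : L.drop i.toNat = (L.drop j).drop (i.toNat - j) := by
    rw [List.drop_drop]; congr 1; omega
  rw [this] at hp
  exact hp.isInfix.trans (List.drop_suffix _ _).isInfix

-- the emitted items at a matching position equal A's loop-body item
theorem pv_emit_hit (P : List Char) (k : Int) (L : List Char) (f e : Bool) (t : Nat)
    (h : P <+: L.drop t) :
    pv_emitScan P k L f e (t : Int) =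
      (let km_pos : List Char × Int :=
        if e then
          if f then (PySem.Chars.slice L (some ((t : Int) - k)) (some (t : Int)), (t : Int) - k)
          else (PySem.Chars.slice L (some ((t : Int) + P.length)) (some ((t : Int) + k + P.length)), (t : Int))
        else
          if f then (PySem.Chars.slice L (some ((t : Int) + P.length)) (some ((t : Int) + k + P.length)), (t : Int))
          else (PySem.Chars.slice L (some ((t : Int) - k)) (some (t : Int)), (t : Int) - k)
       if km_pos.2 < 0 then []
       else [(String.ofList (PySem.Chars.upper km_pos.1), km_pos.2 + 1)]) := by
  have hs : PySem.Chars.startswith (L.drop ((t : Int)).toNat) P = true := by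
    simp [PySem.Chars.startswith, List.isPrefixOf_iff_prefix, h]
  simp only [pv_emitScan, pv_emitB, hs, if_true]
  cases f <;> cases e <;> simp <;> split_ifs <;> simp_all <;> omega

-- A's loop from index j equals a scan over positions j..n
theorem pv_loopA_eq (P : List Char) (k : Int) (L : List Char) (f e : Bool) :
    ∀ j : Nat, j ≤ L.length + 1 →
      find_kmers_loopA P k L f e j =
        (PySem.List.pyRange (j : Int) ((L.length : Int) + 1) 1).flatMap
          (pv_emitScan P k L f e) := by
  suffices H : ∀ m j, j ≤ L.length + 1 → L.length + 1 - j = m →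
      find_kmers_loopA P k L f e j =
        (PySem.List.pyRange (j : Int) ((L.length : Int) + 1) 1).flatMap
          (pv_emitScan P k L f e) by
    intro j hj; exact H _ j hj rfl
  intro m
  induction m using Nat.strong_induction_on with
  | _ m ih =>
    intro j hj hm
    rw [find_kmers_loopA]
    by_cases h : PySem.Chars.findFrom L P (j : Int) none = -1
    · simp only [h, dite_eq_ite, if_pos]
      by_cases hjn : j = L.length + 1
      · subst hjn
        have : PySem.List.pyRange ((L.length : Int) + 1) ((L.length : Int) + 1) 1 = [] := by
          simp [PySem.List.pyRange]
        rw [show (((L.length + 1 : Nat) : Int)) = (L.length : Int) + 1 by push_cast; ring, this]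
        rfl
      · have hj' : j ≤ L.length := by omega
        rw [pv_flatMap_nil P k L f e j
          ((PySem.Chars.findFrom_natCast_eq_neg_one_iff L P j hj').mp h)]
    · obtain ⟨hjlen, hge, hlen⟩ := pv_findFrom_props L P j h
      set r := PySem.Chars.findFrom L P (j : Int) none with hr
      have hspec := PySem.Chars.findFrom_natCast_spec L P j hjlen h
      rw [← hr] at hspec
      obtain ⟨-, hpref, hmin⟩ := hspec
      have htj : j ≤ r.toNat := by omega
      have hrt : r = ((r.toNat : Nat) : Int) := by omega
      rw [PySem.List.pyRange_one_append (j : Int) ((r.toNat : Nat) : Int) ((L.length : Int) + 1)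
            (by omega) (by omega),
          PySem.List.pyRange_one_cons (a := ((r.toNat : Nat) : Int)) (by omega),
          List.flatMap_append, List.flatMap_cons]
      have hnil : (PySem.List.pyRange (j : Int) ((r.toNat : Nat) : Int) 1).flatMap
          (pv_emitScan P k L f e) = [] := by
        apply List.flatMap_eq_nil_iff.mpr
        intro i hi
        rw [PySem.List.mem_pyRange_one] at hi
        exact pv_emitScan_nil P k L f e i (hmin i.toNat (by omega) (by omega))
      rw [hnil, List.nil_append]
      rw [pv_emit_hit P k L f e r.toNat hpref]
      rw [ih (L.length + 1 - (r.toNat + 1)) (by omega) (r.toNat + 1) (by omega) rfl]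
      rw [show (((r.toNat + 1 : Nat) : Int)) = ((r.toNat : Nat) : Int) + 1 by push_cast; ring]
      simp only [← hrt]
      split_ifs with hpos <;> simp

-- B's hash-scan loop with the rolling-hash invariant equals the pure scan over j..n-m
theorem pv_foldB_eq (P : List Char) (k : Int) (L : List Char) (f e : Bool)
    (hm : P.length ≤ L.length) :
    ∀ j : Nat, j ≤ L.length - P.length + 1 → ∀ (acc : List (String × Int)) (h : Int),
      h = pvRaw 0 (pvWin L P.length j) % pvM →
      ((PySem.List.pyRange (j : Int) ((L.length : Int) - (P.length : Int) + 1) 1).foldl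
          (pv_stepB P k L f e (pvRaw 0 P % pvM) ((257 : Int) ^ P.length % pvM)) (h, acc)).2
        = acc ++ (PySem.List.pyRange (j : Int) ((L.length : Int) - (P.length : Int) + 1) 1).flatMap
            (pvG P k L f e) := by
  suffices H : ∀ d j, j ≤ L.length - P.length + 1 → L.length - P.length + 1 - j = d →
      ∀ (acc : List (String × Int)) (h : Int),
      h = pvRaw 0 (pvWin L P.length j) % pvM →
      ((PySem.List.pyRange (j : Int) ((L.length : Int) - (P.length : Int) + 1) 1).foldl
          (pv_stepB P k L f e (pvRaw 0 P % pvM) ((257 : Int) ^ P.length % pvM)) (h, acc)).2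
        = acc ++ (PySem.List.pyRange (j : Int) ((L.length : Int) - (P.length : Int) + 1) 1).flatMap
            (pvG P k L f e) by
    intro j hj; exact H _ j hj rfl
  intro d
  induction d using Nat.strong_induction_on with
  | _ d ih =>
    intro j hj hd acc h hh
    by_cases hend : j = L.length - P.length + 1
    · subst hend
      have hcast : (((L.length - P.length + 1 : Nat) : Int)) = (L.length : Int) - (P.length : Int) + 1 := by
        push_cast [hm]; ring
      have hempty : PySem.List.pyRange ((L.length : Int) - (P.length : Int) + 1)
          ((L.length : Int) - (P.length : Int) + 1) 1 = [] := by
        simp [PySem.List.pyRange]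
      rw [hcast, hempty]
      simp
    · have hjlt : j ≤ L.length - P.length := by omega
      have hjI : (j : Int) < (L.length : Int) - (P.length : Int) + 1 := by
        have : (j : Int) ≤ (L.length : Int) - (P.length : Int) := by
          omega
        omega
      rw [PySem.List.pyRange_one_cons hjI, List.foldl_cons, List.flatMap_cons]
      -- the step at position j
      have hslice : PySem.Chars.slice L (some (j : Int)) (some ((j : Int) + (P.length : Int)))
          = pvWin L P.length j := by simp [PySem.Chars.slice, PySem.List.slice_natCast_add, pvWin]
      have hacc : (pv_stepB P k L f e (pvRaw 0 P % pvM) ((257 : Int) ^ P.length % pvM) (h, acc) (j : Int)).2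
          = acc ++ pvG P k L f e (j : Int) := by
        simp only [pv_stepB, pvG, hslice, Int.toNat_natCast]
        by_cases hwin : pvWin L P.length j = P
        · rw [if_pos, if_pos hwin]
          simp only [Bool.and_eq_true, beq_iff_eq]
          exact ⟨by rw [hh, hwin], hwin⟩
        · rw [if_neg, if_neg hwin, List.append_nil]
          simp only [Bool.and_eq_true, beq_iff_eq]
          exact fun hc => hwin hc.2
      by_cases hlt : j + P.length < L.length
      · -- roll the hash and recurse
        have hltI : (j : Int) + (P.length : Int) < (L.length : Int) := by omega
        have hjL : j < L.length := by omega
        have hget1 : ((PySem.List.pyGet? L (j : Int)).getD ' ') = L[j]'hjL := by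
          rw [PySem.List.pyGet?_natCast, List.getElem?_eq_getElem hjL, Option.getD_some]
        have hget2 : ((PySem.List.pyGet? L ((j : Int) + (P.length : Int))).getD ' ') = L[j + P.length]'hlt := by
          rw [show (j : Int) + (P.length : Int) = ((j + P.length : Nat) : Int) by push_cast; ring,
            PySem.List.pyGet?_natCast, List.getElem?_eq_getElem hlt, Option.getD_some]
        have hnewh : (pv_stepB P k L f e (pvRaw 0 P % pvM) ((257 : Int) ^ P.length % pvM) (h, acc) (j : Int)).1
            = pvRaw 0 (pvWin L P.length (j + 1)) % pvM := by
          simp only [pv_stepB, if_pos hltI, hget1, hget2,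
            PySem.Int.mod_eq_emod_of_pos pvM_pos, hh]
          exact pv_roll L P.length j hlt
        have hrec := ih (L.length - P.length + 1 - (j + 1)) (by omega) (j + 1) (by omega) rfl
          (acc ++ pvG P k L f e (j : Int))
          ((pv_stepB P k L f e (pvRaw 0 P % pvM) ((257 : Int) ^ P.length % pvM) (h, acc) (j : Int)).1)
          hnewh
        rw [show (((j + 1 : Nat) : Int)) = (j : Int) + 1 by push_cast; ring] at hrec
        have hpair : pv_stepB P k L f e (pvRaw 0 P % pvM) ((257 : Int) ^ P.length % pvM) (h, acc) (j : Int)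
            = ((pv_stepB P k L f e (pvRaw 0 P % pvM) ((257 : Int) ^ P.length % pvM) (h, acc) (j : Int)).1,
               acc ++ pvG P k L f e (j : Int)) := by
          rw [← hacc]
        rw [hpair, hrec, List.append_assoc]
      · -- last position: the remaining range is empty
        have hjeq : j = L.length - P.length := by omega
        have hemptyI : (j : Int) + 1 = (L.length : Int) - (P.length : Int) + 1 := by
          subst hjeq; push_cast [hm]; ring
        have hempty : PySem.List.pyRange ((j : Int) + 1)
            ((L.length : Int) - (P.length : Int) + 1) 1 = [] := by
          rw [hemptyI]; simp [PySem.List.pyRange]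
        rw [hempty]
        simp only [List.foldl_nil, List.flatMap_nil, List.append_nil]
        exact hacc

-- past position n-m no window can equal pam (it is too short)
theorem pv_pvG_nil_far (P : List Char) (k : Int) (L : List Char) (f e : Bool) (i : Int)
    (hP : 0 < P.length) (h : (L.length : Int) - (P.length : Int) < i) : pvG P k L f e i = [] := by
  rw [pvG, if_neg]
  intro hw
  have hlen : (pvWin L P.length i.toNat).length = min P.length (L.length - i.toNat) := by
    simp [pvWin]
  rw [hw] at hlen
  omega

-- ===== VERDICT (by name: the statement is the Claim_ definition above) =====
theorem find_kmers_spec : Claim_equal_find_kmers := by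
  intro pam k chrm forward end_ _
  unfold Spec_find_kmers find_kmers
  set P := pam.toList
  set L := chrm.toList
  have hA : find_kmers_loopA P k L forward end_ 0
      = (PySem.List.pyRange 0 ((L.length : Int) + 1) 1).flatMap (pvG P k L forward end_) := by
    rw [pv_loopA_eq P k L forward end_ 0 (by omega)]
    exact List.flatMap_congr (fun i _ => pv_emitScan_eq_pvG P k L forward end_ i)
  show find_kmers_loopA P k L forward end_ 0 = find_kmers_alt pam k chrm forward end_
  have hhp : P.foldl pv_hash_step 0 = pvRaw 0 P % pvM := by
    have := pvHash_eq_raw P 0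
    rwa [Int.zero_emod] at this
  have hpw : PySem.Int.powMod 257 P.length pvM = (257 : Int) ^ P.length % pvM :=
    PySem.Int.powMod_eq_emod 257 P.length pvM_pos
  have hh0 : (PySem.Chars.slice L none (some (P.length : Int))).foldl pv_hash_step 0
      = pvRaw 0 (pvWin L P.length 0) % pvM := by
    rw [show PySem.Chars.slice L none (some (P.length : Int)) = L.take P.length by
      simp [PySem.Chars.slice, PySem.List.slice_to_natCast]]
    have := pvHash_eq_raw (L.take P.length) 0
    rw [Int.zero_emod] at this
    simpa [pvWin] using this
  by_cases hm : P.length ≤ L.length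
  · have hB : find_kmers_alt pam k chrm forward end_
        = (PySem.List.pyRange 0 ((L.length : Int) - (P.length : Int) + 1) 1).flatMap
            (pvG P k L forward end_) := by
      show ((PySem.List.pyRange 0 ((L.length : Int) - (P.length : Int) + 1) 1).foldl
          (pv_stepB P k L forward end_ (P.foldl pv_hash_step 0) (PySem.Int.powMod 257 P.length pvM))
          ((PySem.Chars.slice L none (some (P.length : Int))).foldl pv_hash_step 0, [])).2
        = _
      rw [hhp, hpw]
      have := pv_foldB_eq P k L forward end_ hm 0 (by omega) []
        ((PySem.Chars.slice L none (some (P.length : Int))).foldl pv_hash_step 0) hh0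
      simpa using this
    rw [hA, hB]
    by_cases hz : P.length = 0
    · rw [hz]; norm_num
    · rw [PySem.List.pyRange_one_append 0 ((L.length : Int) - (P.length : Int) + 1)
          ((L.length : Int) + 1) (by omega) (by omega), List.flatMap_append]
      have hnil : (PySem.List.pyRange ((L.length : Int) - (P.length : Int) + 1)
          ((L.length : Int) + 1) 1).flatMap (pvG P k L forward end_) = [] := by
        apply List.flatMap_eq_nil_iff.mpr
        intro i hi
        rw [PySem.List.mem_pyRange_one] at hi
        exact pv_pvG_nil_far P k L forward end_ i (by omega) (by omega)
      rw [hnil, List.append_nil]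
  · -- pam longer than chrm: B scans nothing and A finds nothing
    have hB : find_kmers_alt pam k chrm forward end_ = [] := by
      show ((PySem.List.pyRange 0 ((L.length : Int) - (P.length : Int) + 1) 1).foldl
          (pv_stepB P k L forward end_ (P.foldl pv_hash_step 0) (PySem.Int.powMod 257 P.length pvM))
          ((PySem.Chars.slice L none (some (P.length : Int))).foldl pv_hash_step 0, [])).2
        = []
      have hempty : PySem.List.pyRange 0 ((L.length : Int) - (P.length : Int) + 1) 1 = [] := by
        have : (L.length : Int) - (P.length : Int) + 1 ≤ 0 := by push_cast at *; omega
        simp [PySem.List.pyRange]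
        omega
      rw [hempty]; rfl
    rw [hA, hB]
    apply List.flatMap_eq_nil_iff.mpr
    intro i hi
    rw [PySem.List.mem_pyRange_one] at hi
    exact pv_pvG_nil_far P k L forward end_ i (by omega) (by omega)
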